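-- pv_equiv track=rewrite | github.com/justinchiu/nanomoe | src/nanomoe/data/packing.py | get_seqlen_balanced_partitions
-- ===== SOURCE A (Python) =====
-- import heapq
--
-- def get_seqlen_balanced_partitions(
--     seqlen_list: list[int],
--     k_partitions: int,
--     equal_size: bool = False,
-- ) -> list[list[int]]:
--     """Partition sequences into k groups with balanced total lengths.
--
--     Uses the Karmarkar-Karp differencing algorithm for load balancing.
--
--     Args:
--         seqlen_list: Length of each sequence
--         k_partitions: Number of partitions to create
--         equal_size: If True, each partition must have equal number of items
--
--     Returns:
--         List of k partitions, each containing indices into seqlen_list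
--     """
--     if len(seqlen_list) < k_partitions:
--         raise ValueError(f"num items ({len(seqlen_list)}) < k_partitions ({k_partitions})")
--
--     class Partition:
--         def __init__(self):
--             self.total = 0
--             self.indices: list[int] = []
--
--         def add(self, idx: int, length: int):
--             self.indices.append(idx)
--             self.total += length
--
--         def merge(self, other: "Partition"):
--             self.indices.extend(other.indices)
--             self.total += other.total
--
--         def __lt__(self, other):
--             return (self.total, len(self.indices)) < (other.total, len(other.indices))
--
--     # Sort by length descending for greedy assignment
--     sorted_items = sorted(enumerate(seqlen_list), key=lambda x: -x[1])
--
--     # Initialize partitions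
--     partitions = [Partition() for _ in range(k_partitions)]
--     heap = [(p.total, i, p) for i, p in enumerate(partitions)]
--     heapq.heapify(heap)
--
--     # Greedy assignment: always add to partition with smallest total
--     for idx, length in sorted_items:
--         _, i, p = heapq.heappop(heap)
--         p.add(idx, length)
--         heapq.heappush(heap, (p.total, i, p))
--
--     return [sorted(p.indices) for _, _, p in sorted(heap, key=lambda x: x[1])]
-- ===== SOURCE B (Python) =====
-- def get_seqlen_balanced_partitions(
--     seqlen_list: list[int],
--     k_partitions: int,
--     equal_size: bool = False,
-- ) -> list[list[int]]:
--     """Partition sequences into k groups with balanced total lengths (greedy)."""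
--     if len(seqlen_list) < k_partitions:
--         raise ValueError(f"num items ({len(seqlen_list)}) < k_partitions ({k_partitions})")
--     totals = [0] * k_partitions
--     groups = [[] for _ in totals]
--     for idx, length in sorted(enumerate(seqlen_list), key=lambda x: -x[1]):
--         i = min(range(len(totals)), key=lambda j: (totals[j], j))
--         groups[i].append(idx)
--         totals[i] += length
--     return [sorted(g) for g in groups]
-- ===== Notes on version B (the rewrite author's own statement) =====
-- stated objective: simpler
-- what changed: Replaces the heap of Partition objects with two plain lists (totals, groups) and a linear argmin scan with tie-break (totals[i], i); same greedy assignment over the same descending stable sort.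
import Mathlib
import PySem

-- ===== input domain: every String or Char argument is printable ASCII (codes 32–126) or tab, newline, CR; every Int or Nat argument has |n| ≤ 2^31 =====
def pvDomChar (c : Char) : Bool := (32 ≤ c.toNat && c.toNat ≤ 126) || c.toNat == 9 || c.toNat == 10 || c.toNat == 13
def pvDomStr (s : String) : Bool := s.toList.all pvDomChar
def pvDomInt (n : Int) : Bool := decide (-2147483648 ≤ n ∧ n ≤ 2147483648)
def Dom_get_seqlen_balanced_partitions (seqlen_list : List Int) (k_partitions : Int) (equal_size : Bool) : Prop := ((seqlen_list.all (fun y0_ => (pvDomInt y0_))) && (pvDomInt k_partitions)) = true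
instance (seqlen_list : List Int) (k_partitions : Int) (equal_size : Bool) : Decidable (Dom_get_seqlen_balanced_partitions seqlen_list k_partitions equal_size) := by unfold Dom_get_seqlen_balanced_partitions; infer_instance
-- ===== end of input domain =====

-- B replaces A's heap of Partition objects by two plain lists (totals, groups) and a
-- linear argmin with tie-break key (totals[i], i): simpler, same greedy result.

-- ===== PORT A =====
-- heapq model: the heap is kept as a plain list of entries (total, i, indices); heappop
-- removes the minimum entry under the lexicographic key (total, i).  This is exact for A:
-- the partition indices i are pairwise distinct, so Python's tuple comparison never reaches
-- the third component and the popped minimum is unique (internal heap layout cannot matter: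
-- the final line re-sorts the heap by i).
def pvLexLt (a b : Int × Int × List Int) : Bool :=
  a.1 < b.1 || (a.1 == b.1 && a.2.1 < b.2.1)

def pvPopMin : List (Int × Int × List Int) →
    Option ((Int × Int × List Int) × List (Int × Int × List Int))
  | [] => none
  | x :: xs =>
    match pvPopMin xs with
    | none => some (x, [])
    | some (m, r) => if pvLexLt m x then some (m, x :: r) else some (x, xs)

-- the 'for idx, length in sorted_items' loop: heappop, p.add(idx, length), heappush
def pvALoop : List (Int × Int) → List (Int × Int × List Int) →
    Option (List (Int × Int × List Int))
  | [], heap => some heap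
  | (idx, len) :: rest, heap =>
    match pvPopMin heap with
    | none => none  -- heappop from an empty heap: IndexError (outside Pre_)
    | some ((t, i, ind), h') => pvALoop rest (h' ++ [(t + len, i, ind ++ [idx])])

def get_seqlen_balanced_partitions (seqlen_list : List Int) (k_partitions : Int) (equal_size : Bool) : List (List Int) :=
  if (seqlen_list.length : Int) < k_partitions then []  -- ValueError (outside Pre_)
  else
    let sorted_items := PySem.List.sorted (PySem.List.enumerate seqlen_list) (fun x => -x.2) false
    let heap := (PySem.List.pyRange 0 k_partitions 1).map (fun i => ((0 : Int), i, ([] : List Int)))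
    match pvALoop sorted_items heap with
    | none => []  -- IndexError (outside Pre_)
    | some h =>
      (PySem.List.sorted h (fun x => x.2.1) false).map
        (fun x => PySem.List.sorted x.2.2 (fun v => v) false)

-- ===== PORT B =====
-- the 'for idx, length in sorted(...)' loop of Source B: i = min(range(len(totals)), key=(totals[j], j))
def pvBLoop : List (Int × Int) → List Int → List (List Int) →
    Option (List Int × List (List Int))
  | [], totals, groups => some (totals, groups)
  | (idx, len) :: rest, totals, groups =>
    match PySem.List.min2? (PySem.List.pyRange 0 (totals.length : Int) 1)
        (fun j => PySem.List.pyGetD totals j 0) (fun j => j) with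
    | none => none  -- min() of an empty range: ValueError (outside Pre_)
    | some i =>
      pvBLoop rest
        (totals.set i.toNat (PySem.List.pyGetD totals i 0 + len))
        (groups.set i.toNat (PySem.List.pyGetD groups i [] ++ [idx]))

def get_seqlen_balanced_partitions_alt (seqlen_list : List Int) (k_partitions : Int) (equal_size : Bool) : List (List Int) :=
  if (seqlen_list.length : Int) < k_partitions then []  -- ValueError (outside Pre_)
  else
    match pvBLoop (PySem.List.sorted (PySem.List.enumerate seqlen_list) (fun x => -x.2) false)
        (List.replicate k_partitions.toNat (0 : Int))
        (List.replicate k_partitions.toNat ([] : List Int)) with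
    | none => []  -- ValueError (outside Pre_)
    | some (_, groups) => groups.map (fun g => PySem.List.sorted g (fun v => v) false)

-- ===== PRECONDITION & SPEC =====
-- Pre_ excludes exactly the inputs on which Python A raises: len(seqlen_list) < k_partitions
-- (ValueError) and k_partitions < 1 with a nonempty list (heappop from an empty heap: IndexError).
def Pre_get_seqlen_balanced_partitions (seqlen_list : List Int) (k_partitions : Int) (equal_size : Bool) : Prop :=
  k_partitions ≤ (seqlen_list.length : Int) ∧ (1 ≤ k_partitions ∨ seqlen_list = [])
instance (seqlen_list : List Int) (k_partitions : Int) (equal_size : Bool) : Decidable (Pre_get_seqlen_balanced_partitions seqlen_list k_partitions equal_size) := by unfold Pre_get_seqlen_balanced_partitions; infer_instance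

def pvWitness_get_seqlen_balanced_partitions : List Int × Int × Bool := ([3, 1, 2, 2, 1], 2, false)

def Spec_get_seqlen_balanced_partitions (seqlen_list : List Int) (k_partitions : Int) (equal_size : Bool) (out : List (List Int)) : Prop := out = get_seqlen_balanced_partitions_alt seqlen_list k_partitions equal_size
instance (seqlen_list : List Int) (k_partitions : Int) (equal_size : Bool) (out : List (List Int)) : Decidable (Spec_get_seqlen_balanced_partitions seqlen_list k_partitions equal_size out) := by unfold Spec_get_seqlen_balanced_partitions; infer_instance

-- ===== CLAIM (what is proved, stated in full; the proofs are below) =====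
def Claim_equal_get_seqlen_balanced_partitions : Prop := ∀ (seqlen_list : List Int) (k_partitions : Int) (equal_size : Bool), Dom_get_seqlen_balanced_partitions seqlen_list k_partitions equal_size → Pre_get_seqlen_balanced_partitions seqlen_list k_partitions equal_size → Spec_get_seqlen_balanced_partitions seqlen_list k_partitions equal_size (get_seqlen_balanced_partitions seqlen_list k_partitions equal_size)

-- ===== LEMMAS AND PROOFS =====

-- the canonical heap contents: entry j is (totals[j], j, groups[j])
def pvCanon (totals : List Int) (groups : List (List Int)) : List (Int × Int × List Int) :=
  (List.range totals.length).map (fun j => (totals.getD j 0, (j : Int), groups.getD j []))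

theorem pvLexLt_irrefl (a : Int × Int × List Int) : pvLexLt a a = false := by
  simp [pvLexLt]

theorem pvLexLt_false_trans {a b c : Int × Int × List Int}
    (h1 : pvLexLt a b = false) (h2 : pvLexLt b c = false) : pvLexLt a c = false := by
  simp [pvLexLt] at *
  omega

theorem pvPopMin_none_iff (l : List (Int × Int × List Int)) :
    pvPopMin l = none ↔ l = [] := by
  cases l with
  | nil => simp [pvPopMin]
  | cons x xs =>
    simp only [pvPopMin]
    cases h : pvPopMin xs with
    | none => simp
    | some p => rcases p with ⟨m, r⟩; by_cases hlt : pvLexLt m x <;> simp [hlt]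

theorem pvPopMin_spec {l : List (Int × Int × List Int)} {m : Int × Int × List Int}
    {r : List (Int × Int × List Int)} (h : pvPopMin l = some (m, r)) :
    m ∈ l ∧ (∀ x ∈ l, pvLexLt x m = false) ∧ (m :: r).Perm l := by
  induction l generalizing m r with
  | nil => simp [pvPopMin] at h
  | cons x xs ih =>
    simp only [pvPopMin] at h
    cases hxs : pvPopMin xs with
    | none =>
      have hnil : xs = [] := (pvPopMin_none_iff xs).mp hxs
      rw [hxs] at h
      simp only [Option.some.injEq, Prod.mk.injEq] at h
      obtain ⟨rfl, rfl⟩ := h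
      subst hnil
      exact ⟨by simp, by simp [pvLexLt_irrefl], by simp⟩
    | some p =>
      rcases p with ⟨m', r'⟩
      rw [hxs] at h
      obtain ⟨hm', hmin', hperm'⟩ := ih hxs
      dsimp only at h
      by_cases hlt : pvLexLt m' x = true
      · rw [if_pos hlt] at h
        simp only [Option.some.injEq, Prod.mk.injEq] at h
        obtain ⟨rfl, rfl⟩ := h
        refine ⟨List.mem_cons_of_mem _ hm', ?_, ?_⟩
        · intro y hy
          rcases List.mem_cons.mp hy with rfl | hy
          · simp only [pvLexLt] at hlt ⊢
            simp only [Bool.or_eq_true, Bool.and_eq_true, decide_eq_true_eq, beq_iff_eq] at hlt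
            simp only [Bool.or_eq_false_iff, Bool.and_eq_false_iff, decide_eq_false_iff_not,
              beq_eq_false_iff_ne, ne_eq]
            omega
          · exact hmin' y hy
        · exact (List.Perm.swap x m' r').trans (hperm'.cons x)
      · rw [if_neg hlt] at h
        simp only [Option.some.injEq, Prod.mk.injEq] at h
        obtain ⟨rfl, rfl⟩ := h
        refine ⟨List.mem_cons_self, ?_, List.Perm.refl _⟩
        intro y hy
        rcases List.mem_cons.mp hy with rfl | hy
        · exact pvLexLt_irrefl y
        · have h1 := hmin' y hy
          have h2 : pvLexLt m' x = false := by simpa using hlt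
          exact pvLexLt_false_trans h1 h2

-- min2? on a list of distinct Ints with tie-break key j: strict lexicographic minimality
theorem pvMin2Aux (f : Int → Int) (g : Option Int → Int → Option Int)
    (hg : ∀ (b x : Int), g (some b) x =
      if (decide (f x < f b) || !decide (f b < f x) && decide (x < b)) = true
      then some x else some b) :
    ∀ (xs : List Int) (a m : Int), xs.Nodup → a ∉ xs →
      List.foldl g (some a) xs = some m →
      (m = a ∨ m ∈ xs) ∧
        (∀ y, (y = a ∨ y ∈ xs) → y ≠ m → f m < f y ∨ (f m = f y ∧ m < y)) := by
  intro xs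
  induction xs with
  | nil =>
    intro a m _ _ h
    simp only [List.foldl_nil, Option.some.injEq] at h
    subst h
    exact ⟨Or.inl rfl, by tauto⟩
  | cons x xs ih =>
    intro a m hnd hna h
    rw [List.foldl_cons, hg a x] at h
    have hax : a ≠ x := by intro hh; exact hna (hh ▸ List.mem_cons_self)
    have hnd' : xs.Nodup := (List.nodup_cons.mp hnd).2
    have hxx : x ∉ xs := (List.nodup_cons.mp hnd).1
    have hna' : a ∉ xs := fun hc => hna (List.mem_cons_of_mem _ hc)
    by_cases hc : (decide (f x < f a) || !decide (f a < f x) && decide (x < a)) = true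
    · -- new best is x; the dropped a satisfies x <lex a strictly
      rw [if_pos hc] at h
      have hcp : f x < f a ∨ (¬ f a < f x ∧ x < a) := by
        simpa using hc
      obtain ⟨hmem, hall⟩ := ih x m hnd' hxx h
      constructor
      · rcases hmem with rfl | hm
        · exact Or.inr List.mem_cons_self
        · exact Or.inr (List.mem_cons_of_mem _ hm)
      · intro y hy hne
        have hmx : m = x ∨ f m < f x ∨ (f m = f x ∧ m < x) := by
          by_cases hmx : m = x
          · exact Or.inl hmx
          · exact Or.inr (hall x (Or.inl rfl) fun hh => hmx hh.symm)
        rcases hy with rfl | hy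
        · rcases hmx with rfl | hlt | hlt <;> omega
        · rcases List.mem_cons.mp hy with rfl | hy
          · rcases hmx with rfl | hlt | hlt
            · exact absurd rfl hne
            · exact Or.inl hlt
            · exact Or.inr hlt
          · exact hall y (Or.inr hy) hne
    · -- best stays a; the skipped x satisfies a <lex x strictly (a ≠ x)
      rw [if_neg hc] at h
      have hcp : ¬(f x < f a ∨ (¬ f a < f x ∧ x < a)) := by
        simpa using hc
      obtain ⟨hmem, hall⟩ := ih a m hnd' hna' h
      constructor
      · rcases hmem with rfl | hm
        · exact Or.inl rfl
        · exact Or.inr (List.mem_cons_of_mem _ hm)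
      · intro y hy hne
        have hma : m = a ∨ f m < f a ∨ (f m = f a ∧ m < a) := by
          by_cases hma : m = a
          · exact Or.inl hma
          · exact Or.inr (hall a (Or.inl rfl) fun hh => hma hh.symm)
        rcases hy with rfl | hy
        · exact hall y (Or.inl rfl) hne
        · rcases List.mem_cons.mp hy with rfl | hy
          · rcases hma with rfl | hlt | hlt <;> omega
          · exact hall y (Or.inr hy) hne

theorem pvMin2Spec (f : Int → Int) (xs : List Int) (m : Int) (hnd : xs.Nodup)
    (h : PySem.List.min2? xs f (fun j => j) = some m) :
    m ∈ xs ∧ ∀ y ∈ xs, y ≠ m → f m < f y ∨ (f m = f y ∧ m < y) := by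
  unfold PySem.List.min2? at h
  cases xs with
  | nil => simp at h
  | cons x rest =>
    rw [List.foldl_cons] at h
    obtain ⟨hmem, hall⟩ :=
      pvMin2Aux f _ (fun b x => rfl) rest x m
        (List.nodup_cons.mp hnd).2 (List.nodup_cons.mp hnd).1 h
    constructor
    · rcases hmem with rfl | hm
      · exact List.mem_cons_self
      · exact List.mem_cons_of_mem _ hm
    · intro y hy hne
      rcases List.mem_cons.mp hy with rfl | hy
      · exact hall y (Or.inl rfl) hne
      · exact hall y (Or.inr hy) hne

theorem pvPerm_cons_eraseIdx {α : Type} (l : List α) (i : Nat) (h : i < l.length) :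
    l.Perm (l[i] :: l.eraseIdx i) := by
  have hd : l.drop i = l[i] :: l.drop (i+1) := (List.getElem_cons_drop h).symm
  conv_lhs => rw [← List.take_append_drop i l, hd]
  rw [List.eraseIdx_eq_take_drop_succ]
  exact List.perm_middle

theorem pvEraseIdxSet {α : Type} (l : List α) (i : Nat) (e : α) :
    (l.set i e).eraseIdx i = l.eraseIdx i := by
  have hs : (List.take i l).set i e = List.take i l :=
    List.set_eq_of_length_le (by simp)
  simp [List.eraseIdx_eq_take_drop_succ, List.take_set, List.drop_set, hs]

theorem pvCanon_length (t : List Int) (g : List (List Int)) :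
    (pvCanon t g).length = t.length := by simp [pvCanon]

theorem pvMapRangeGetD {α β : Type} (l : List α) (d : α) (f : α → β) :
    (List.range l.length).map (fun j => f (l.getD j d)) = l.map f := by
  apply List.ext_getElem
  · simp
  · intro i h1 h2
    simp only [List.length_map, List.length_range] at h1
    simp [List.getD_eq_getElem?_getD, List.getElem?_eq_getElem (by simpa using h1)]

-- loop-equation lemmas (iota-reduced forms of the two loop bodies)
theorem pvALoop_cons_none {idx len : Int} {rest : List (Int × Int)}
    {heap : List (Int × Int × List Int)} (h : pvPopMin heap = none) :
    pvALoop ((idx, len) :: rest) heap = none := by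
  rw [show pvALoop ((idx, len) :: rest) heap = (match pvPopMin heap with
    | none => none
    | some ((t, i, ind), h') => pvALoop rest (h' ++ [(t + len, i, ind ++ [idx])])) from rfl, h]

theorem pvALoop_cons_some {idx len a b : Int} {c : List Int} {rest : List (Int × Int)}
    {heap r : List (Int × Int × List Int)} (h : pvPopMin heap = some ((a, b, c), r)) :
    pvALoop ((idx, len) :: rest) heap = pvALoop rest (r ++ [(a + len, b, c ++ [idx])]) := by
  rw [show pvALoop ((idx, len) :: rest) heap = (match pvPopMin heap with
    | none => none
    | some ((t, i, ind), h') => pvALoop rest (h' ++ [(t + len, i, ind ++ [idx])])) from rfl, h]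

theorem pvBLoop_cons_none {idx len : Int} {rest : List (Int × Int)}
    {totals : List Int} {groups : List (List Int)}
    (h : PySem.List.min2? (PySem.List.pyRange 0 (totals.length : Int) 1)
      (fun j => PySem.List.pyGetD totals j 0) (fun j => j) = none) :
    pvBLoop ((idx, len) :: rest) totals groups = none := by
  rw [show pvBLoop ((idx, len) :: rest) totals groups =
    (match PySem.List.min2? (PySem.List.pyRange 0 (totals.length : Int) 1)
        (fun j => PySem.List.pyGetD totals j 0) (fun j => j) with
    | none => none
    | some i => pvBLoop rest (totals.set i.toNat (PySem.List.pyGetD totals i 0 + len))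
        (groups.set i.toNat (PySem.List.pyGetD groups i [] ++ [idx]))) from rfl, h]

theorem pvBLoop_cons_some {idx len i : Int} {rest : List (Int × Int)}
    {totals : List Int} {groups : List (List Int)}
    (h : PySem.List.min2? (PySem.List.pyRange 0 (totals.length : Int) 1)
      (fun j => PySem.List.pyGetD totals j 0) (fun j => j) = some i) :
    pvBLoop ((idx, len) :: rest) totals groups =
      pvBLoop rest (totals.set i.toNat (PySem.List.pyGetD totals i 0 + len))
        (groups.set i.toNat (PySem.List.pyGetD groups i [] ++ [idx])) := by
  rw [show pvBLoop ((idx, len) :: rest) totals groups =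
    (match PySem.List.min2? (PySem.List.pyRange 0 (totals.length : Int) 1)
        (fun j => PySem.List.pyGetD totals j 0) (fun j => j) with
    | none => none
    | some i => pvBLoop rest (totals.set i.toNat (PySem.List.pyGetD totals i 0 + len))
        (groups.set i.toNat (PySem.List.pyGetD groups i [] ++ [idx]))) from rfl, h]

-- the foldl inside min2? never turns a some-accumulator into none
theorem pvFoldSome (f : Int → Int) (g : Option Int → Int → Option Int)
    (hg : ∀ (b x : Int), g (some b) x =
      if (decide (f x < f b) || !decide (f b < f x) && decide (x < b)) = true
      then some x else some b) :
    ∀ (xs : List Int) (a : Int), ∃ m, List.foldl g (some a) xs = some m := by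
  intro xs
  induction xs with
  | nil => intro a; exact ⟨a, rfl⟩
  | cons x xs ih =>
    intro a
    rw [List.foldl_cons, hg a x]
    by_cases hc : (decide (f x < f a) || !decide (f a < f x) && decide (x < a)) = true
    · rw [if_pos hc]; exact ih x
    · rw [if_neg hc]; exact ih a

theorem pvCanon_getElem (t : List Int) (g : List (List Int)) (j : Nat) (hj : j < t.length) :
    (pvCanon t g)[j]'(by simpa [pvCanon] using hj) = (t.getD j 0, (j : Int), g.getD j []) := by
  simp [pvCanon]

theorem pvCanon_mem {t : List Int} {g : List (List Int)} {m : Int × Int × List Int}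
    (h : m ∈ pvCanon t g) :
    ∃ j, j < t.length ∧ m = (t.getD j 0, (j : Int), g.getD j []) := by
  simp only [pvCanon, List.mem_map, List.mem_range] at h
  obtain ⟨j, hj, hm⟩ := h
  exact ⟨j, hj, hm.symm⟩

theorem pvCanon_set (t : List Int) (g : List (List Int)) (j : Nat) (hj : j < t.length)
    (hlen : t.length = g.length) (a : Int) (b : List Int) :
    pvCanon (t.set j a) (g.set j b) = (pvCanon t g).set j (a, (j : Int), b) := by
  apply List.ext_getElem
  · simp [pvCanon]
  · intro i h1 h2
    simp only [pvCanon, List.length_set, List.getElem_map, List.getElem_range,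
      List.length_map, List.length_range] at h1 ⊢
    rw [List.getElem_set]
    by_cases hji : j = i
    · subst hji
      simp [hj, hlen ▸ hj]
    · simp [hji]

-- the step/loop correspondence
theorem pvLoopRel :
    ∀ (items : List (Int × Int)) (totals : List Int) (groups : List (List Int))
      (heap : List (Int × Int × List Int)),
      totals.length = groups.length → heap.Perm (pvCanon totals groups) →
      (pvALoop items heap = none ∧ pvBLoop items totals groups = none) ∨
      (∃ h t g, pvALoop items heap = some h ∧ pvBLoop items totals groups = some (t, g) ∧
        t.length = g.length ∧ h.Perm (pvCanon t g)) := by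
  intro items
  induction items with
  | nil => intro t g heap hlen hperm; exact Or.inr ⟨heap, t, g, rfl, rfl, hlen, hperm⟩
  | cons p rest ih =>
    rcases p with ⟨idx, len⟩
    intro t g heap hlen hperm
    have hclen : (pvCanon t g).length = t.length := pvCanon_length t g
    by_cases hn : t.length = 0
    · -- k = 0 with items left: heappop and min() both fail
      have ht : t = [] := List.length_eq_zero_iff.mp hn
      subst ht
      have hc0 : pvCanon [] g = [] := by simp [pvCanon]
      have hheap : heap = [] := List.Perm.eq_nil (hc0 ▸ hperm)
      subst hheap
      left
      refine ⟨pvALoop_cons_none (by rfl), pvBLoop_cons_none (by rfl)⟩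
    · have hn' : 0 < t.length := Nat.pos_of_ne_zero hn
      have hrange : PySem.List.pyRange 0 (t.length : Int) 1 =
          (List.range t.length).map (fun (k : Nat) => (k : Int)) :=
        PySem.List.pyRange_zero_natCast _
      -- the argmin exists
      obtain ⟨i, hmin⟩ : ∃ i, PySem.List.min2? (PySem.List.pyRange 0 (t.length : Int) 1)
          (fun j => PySem.List.pyGetD t j 0) (fun j => j) = some i := by
        rw [hrange]
        cases hr : (List.range t.length).map (fun (k : Nat) => (k : Int)) with
        | nil =>
          exfalso
          have hlen0 : ((List.range t.length).map (fun (k : Nat) => (k : Int))).length = 0 := by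
            rw [hr]; rfl
          rw [List.length_map, List.length_range] at hlen0
          omega
        | cons x xs =>
          unfold PySem.List.min2?
          rw [List.foldl_cons]
          exact pvFoldSome (fun j => PySem.List.pyGetD t j 0) _ (fun b x => rfl) xs x
      have hnd : ((List.range t.length).map (fun (k : Nat) => (k : Int))).Nodup :=
        List.Nodup.map (fun a b hab => by exact_mod_cast hab) List.nodup_range
      rw [hrange] at hmin
      obtain ⟨himem, hstrict⟩ :=
        pvMin2Spec (fun j => PySem.List.pyGetD t j 0) _ i hnd hmin
      rw [← hrange] at hmin
      obtain ⟨iN, hiN, hieq⟩ : ∃ iN, iN < t.length ∧ (iN : Int) = i := by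
        simpa [List.mem_map, List.mem_range] using himem
      subst hieq
      -- the popped heap entry is the canonical entry at iN
      have hhlen : heap.length = t.length := by rw [hperm.length_eq, hclen]
      cases hpop : pvPopMin heap with
      | none =>
        exfalso
        have : heap = [] := (pvPopMin_none_iff heap).mp hpop
        rw [this] at hhlen
        simp at hhlen
        omega
      | some pr =>
        rcases pr with ⟨m, r⟩
        obtain ⟨hm_mem, hmin_all, hmr⟩ := pvPopMin_spec hpop
        have hm_canon : m ∈ pvCanon t g := (hperm.mem_iff).mp hm_mem
        obtain ⟨jN, hjN, hmeq⟩ := pvCanon_mem hm_canon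
        have hji : jN = iN := by
          by_contra hne
          have hyj : ((jN : Int)) ∈ (List.range t.length).map (fun (k : Nat) => (k : Int)) := by
            simp [List.mem_map, List.mem_range]
            exact hjN
          have hyne : ((jN : Int)) ≠ ((iN : Int)) := by
            intro hh
            exact hne (by exact_mod_cast hh)
          have hlex := hstrict _ hyj hyne
          simp only [PySem.List.pyGetD_natCast] at hlex
          have hlt : pvLexLt ((pvCanon t g)[iN]'(by simpa [pvCanon] using hiN)) m = true := by
            rw [pvCanon_getElem t g iN hiN, hmeq]
            simp only [pvLexLt, Bool.or_eq_true, Bool.and_eq_true, decide_eq_true_eq,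
              beq_iff_eq]
            rcases hlex with hlt | ⟨heq, hlt⟩
            · exact Or.inl hlt
            · exact Or.inr ⟨heq, by exact_mod_cast hlt⟩
          have hfalse := hmin_all _ ((hperm.mem_iff).mpr (List.getElem_mem (by simpa [pvCanon] using hiN)))
          rw [hfalse] at hlt
          exact Bool.false_ne_true hlt
        subst hji
        rw [hmeq] at hpop hmr
        -- reduce both loops one step
        rw [pvALoop_cons_some hpop, pvBLoop_cons_some hmin]
        have htoNat : ((jN : Int)).toNat = jN := Int.toNat_natCast jN
        rw [htoNat, PySem.List.pyGetD_natCast, PySem.List.pyGetD_natCast]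
        -- the new states still correspond
        set nE : Int × Int × List Int := (t.getD jN 0 + len, (jN : Int), g.getD jN [] ++ [idx]) with hnE
        have hset : pvCanon (t.set jN (t.getD jN 0 + len)) (g.set jN (g.getD jN [] ++ [idx])) =
            (pvCanon t g).set jN nE := pvCanon_set t g jN hjN hlen _ _
        have hperm1 : (pvCanon t g).Perm ((t.getD jN 0, (jN : Int), g.getD jN []) :: (pvCanon t g).eraseIdx jN) := by
          have := pvPerm_cons_eraseIdx (pvCanon t g) jN (by omega)
          rwa [pvCanon_getElem t g jN hjN] at this
        have hr : r.Perm ((pvCanon t g).eraseIdx jN) :=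
          List.Perm.cons_inv (hmr.trans (hperm.trans hperm1))
        have hperm2 : ((pvCanon t g).set jN nE).Perm (nE :: (pvCanon t g).eraseIdx jN) := by
          have hlt : jN < ((pvCanon t g).set jN nE).length := by
            simp [hclen]
            omega
          have h1 := pvPerm_cons_eraseIdx ((pvCanon t g).set jN nE) jN hlt
          rwa [List.getElem_set_self (by omega), pvEraseIdxSet] at h1
        have hnew : (r ++ [nE]).Perm (pvCanon (t.set jN (t.getD jN 0 + len)) (g.set jN (g.getD jN [] ++ [idx]))) := by
          rw [hset]
          exact ((List.perm_append_singleton nE r).trans (hr.cons nE)).trans hperm2.symm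
        exact ih _ _ _ (by simp [hlen]) hnew

theorem get_seqlen_bp_eq (seqlen_list : List Int) (k_partitions : Int) (equal_size : Bool) :
    get_seqlen_balanced_partitions seqlen_list k_partitions equal_size =
      get_seqlen_balanced_partitions_alt seqlen_list k_partitions equal_size := by
  unfold get_seqlen_balanced_partitions get_seqlen_balanced_partitions_alt
  by_cases hk : (seqlen_list.length : Int) < k_partitions
  · rw [if_pos hk, if_pos hk]
  · rw [if_neg hk, if_neg hk]
    dsimp only
    have hinit : ((PySem.List.pyRange 0 k_partitions 1).map
        (fun i => ((0 : Int), i, ([] : List Int)))) =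
        pvCanon (List.replicate k_partitions.toNat 0) (List.replicate k_partitions.toNat []) := by
      by_cases hkpos : 0 ≤ k_partitions
      · have hkc : k_partitions = ((k_partitions.toNat : Nat) : Int) := by omega
        have hr := PySem.List.pyRange_zero_natCast k_partitions.toNat
        rw [← hkc] at hr
        rw [hr, List.map_map]
        unfold pvCanon
        rw [List.length_replicate]
        apply List.ext_getElem
        · simp
        · intro i h1 h2
          simp
      · have h1 : PySem.List.pyRange 0 k_partitions 1 = [] :=
          PySem.List.pyRange_one_eq_nil (by omega)
        have h2 : k_partitions.toNat = 0 := by omega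
        rw [h1, h2]
        simp [pvCanon]
    rcases pvLoopRel (PySem.List.sorted (PySem.List.enumerate seqlen_list) (fun x => -x.2) false)
        (List.replicate k_partitions.toNat 0) (List.replicate k_partitions.toNat [])
        ((PySem.List.pyRange 0 k_partitions 1).map (fun i => ((0 : Int), i, ([] : List Int))))
        (by simp) (by rw [hinit]) with
      ⟨ha, hb⟩ | ⟨h, t, g, ha, hb, hlen, hperm⟩
    · rw [ha, hb]
    · rw [ha, hb]
      dsimp only
      have hpair : (pvCanon t g).Pairwise (fun a b => a.2.1 < b.2.1) := by
        unfold pvCanon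
        rw [List.pairwise_map]
        exact List.pairwise_lt_range.imp (fun hab => by simpa using hab)
      have hsorted : PySem.List.sorted h (fun x => x.2.1) false = pvCanon t g :=
        PySem.List.sorted_eq_of_perm_of_pairwise_lt _ _ _ hperm.symm hpair
      rw [hsorted]
      unfold pvCanon
      rw [List.map_map]
      have hcomp : ((fun (x : Int × Int × List Int) => PySem.List.sorted x.2.2 (fun v => v) false) ∘
          (fun j => (t.getD j 0, (j : Int), g.getD j []))) =
          (fun (j : Nat) => PySem.List.sorted (g.getD j []) (fun v => v) false) := rfl
      rw [hcomp, hlen]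
      exact pvMapRangeGetD g [] (fun gg => PySem.List.sorted gg (fun v => v) false)

-- ===== VERDICT (by name: the statement is the Claim_ definition above) =====
theorem get_seqlen_balanced_partitions_spec : Claim_equal_get_seqlen_balanced_partitions := by
  intro xs k eq _ _
  unfold Spec_get_seqlen_balanced_partitions
  exact get_seqlen_bp_eq xs k eq
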